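-- pv_equiv track=rewrite | github.com/bcbio/hivdrm | hivdrm.py | get_umi
-- ===== SOURCE A (Python) =====
-- def hamming_dist(s1, s2):
--     return sum(1 for (a, b) in zip(s1, s2) if a != b)
--
-- def get_umi(s_umi, dict_umi):
--     """find 1-bp distant umi in a dictionary """
--     s_result = s_umi
--     if s_umi not in dict_umi:
--         for s in dict_umi:
--             dist = hamming_dist(s, s_umi)
--             #sm = SequenceMatcher(None, s, s_umi)
--             #if sm.ratio() >= 0.9:
--             if dist == 1:
--                 s_result = s
--                 break
--     return s_result
-- ===== SOURCE B (Python) =====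
-- def get_umi(s_umi, dict_umi):
--     """find 1-bp distant umi in a dictionary """
--     if s_umi in dict_umi:
--         return s_umi
--     # first insertion index of every key of the same length as s_umi
--     index = {}
--     for i, s in enumerate(dict_umi):
--         if len(s) == len(s_umi) and s not in index:
--             index[s] = i
--     alphabet = {c for s in dict_umi for c in s}
--     # hash-look-up every 1-substitution neighbour of s_umi, keep the earliest key
--     best = None
--     for i, ch in enumerate(s_umi):
--         for c in alphabet:
--             if c != ch:
--                 v = s_umi[:i] + c + s_umi[i + 1:]
--                 j = index.get(v)
--                 if j is not None and (best is None or j < best[0]):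
--                     best = (j, v)
--     return best[1] if best is not None else s_umi
-- ===== Notes on version B (the rewrite author's own statement) =====
-- stated objective: alternative
-- what changed: A linearly scans the dict keys computing a zip-truncated Hamming distance for each; B builds a hash index (first insertion position of every key of s_umi's length) in one pass and hash-looks-up the 1-substitution neighbours of s_umi, keeping the earliest key.
-- intended difference: On dicts where s_umi is absent and the first key at zip-truncated distance 1 has a different length than s_umi, A returns that key (zip silently drops the length difference, so it is not actually 1 bp distant); B returns the first equal-length key at Hamming distance 1, or s_umi itself if none exists, which is the intended '1-bp distant umi'. — e.g. on get_umi("AA", [("C", 0)]): A returns "C", B returns "AA"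
import Mathlib
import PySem

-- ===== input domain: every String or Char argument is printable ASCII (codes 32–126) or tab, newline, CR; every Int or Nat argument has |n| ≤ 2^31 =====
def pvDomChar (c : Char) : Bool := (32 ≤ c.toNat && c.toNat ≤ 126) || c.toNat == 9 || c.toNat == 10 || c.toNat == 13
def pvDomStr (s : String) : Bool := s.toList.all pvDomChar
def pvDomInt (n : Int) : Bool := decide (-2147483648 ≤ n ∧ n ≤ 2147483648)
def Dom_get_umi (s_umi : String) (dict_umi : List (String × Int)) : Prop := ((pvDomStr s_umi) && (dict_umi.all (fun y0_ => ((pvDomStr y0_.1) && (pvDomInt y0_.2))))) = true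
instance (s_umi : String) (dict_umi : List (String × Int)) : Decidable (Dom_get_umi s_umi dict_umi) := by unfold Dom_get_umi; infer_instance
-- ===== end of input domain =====

-- B (alternative algorithm): instead of A's linear scan computing a Hamming distance per key,
-- index the keys of s_umi's length by first insertion position and hash-look-up the
-- 1-substitution neighbours of s_umi, keeping the earliest key; keys of a different
-- length are never "1 bp distant", which A's zip-truncated distance gets wrong (see D_).

-- ===== PORT A =====
-- hamming_dist(s1, s2) = sum(1 for (a, b) in zip(s1, s2) if a != b)
def pvHamming (s1 s2 : List Char) : Int :=
  (((s1.zip s2).filter (fun ab => ab.1 != ab.2)).map (fun _ => (1 : Int))).sum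

-- the 'for s in dict_umi: … break' loop; s_result stays s_umi when no key matches
def pvLoopA (s_umi : String) : List String → String
  | [] => s_umi
  | s :: rest => if pvHamming s.toList s_umi.toList == 1 then s else pvLoopA s_umi rest

def get_umi (s_umi : String) (dict_umi : List (String × Int)) : String :=
  if dict_umi.any (fun kv => kv.1 == s_umi) then s_umi
  else pvLoopA s_umi (dict_umi.map Prod.fst)

-- ===== PORT B =====
-- v = s_umi[:i] + c + s_umi[i+1:]
def pvMask (p : List Char) (i : Nat) (c : Char) : List Char :=
  p.take i ++ [c] ++ p.drop (i + 1)

-- the 'for i, s in enumerate(dict_umi)' loop: first index of every key of length L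
def pvBuildIdx (L : Nat) (idx : Nat) (keys : List (List Char)) (D : PySem.Dict (List Char) Nat) :
    PySem.Dict (List Char) Nat :=
  match keys with
  | [] => D
  | s :: rest =>
    if s.length = L then pvBuildIdx L (idx + 1) rest (D.setdefault s idx)
    else pvBuildIdx L (idx + 1) rest D

-- j = index.get(v), paired with the neighbour v itself
def pvHit (D : PySem.Dict (List Char) Nat) (v : List Char) : Option (Nat × List Char) :=
  (D.get? v).map (fun j => (j, v))

-- 'if j is not None and (best is None or j < best[0]): best = (j, v)'
def pvStep (best hit : Option (Nat × List Char)) : Option (Nat × List Char) :=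
  match hit with
  | none => best
  | some h =>
    match best with
    | none => some h
    | some b => if h.1 < b.1 then some h else best

-- the double loop 'for i, ch in enumerate(s_umi): for c in alphabet: if c != ch: …'
def pvSearch (u : List Char) (alph : List Char) (D : PySem.Dict (List Char) Nat) :
    Option (Nat × List Char) :=
  (List.range u.length).foldl (fun best i =>
    alph.foldl (fun best c =>
      if c == u.getD i c then best
      else pvStep best (pvHit D (pvMask u i c))) best) none

def get_umi_alt (s_umi : String) (dict_umi : List (String × Int)) : String :=
  if dict_umi.any (fun kv => kv.1 == s_umi) then s_umi
  else
    let u := s_umi.toList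
    let keys := dict_umi.map (fun kv => kv.1.toList)
    let alph : PySem.Set Char := PySem.Set.ofList (keys.flatMap id)
    let idx := pvBuildIdx u.length 0 keys PySem.Dict.empty
    match pvSearch u alph idx with
    | none => s_umi
    | some h => String.ofList h.2

-- ===== PRECONDITION & SPEC =====
-- On dicts where s_umi is absent and the first key at zip-truncated distance 1 (the count
-- of mismatching positions of the common prefix, which is what A's hamming_dist computes)
-- has a DIFFERENT length than s_umi, A returns that key although it is not 1 bp distant
-- (zip silently drops the tail); B, which only matches keys of s_umi's length, returns
-- the intended result — the first equal-length key at Hamming distance 1, or s_umi.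
def D_get_umi (s_umi : String) (dict_umi : List (String × Int)) : Prop :=
  s_umi ∉ dict_umi.map Prod.fst ∧
  ((dict_umi.find? (fun kv => (kv.1.toList.zipWith (· != ·) s_umi.toList).count true == 1)).any
    (fun kv => kv.1.length != s_umi.length)) = true
instance (s_umi : String) (dict_umi : List (String × Int)) : Decidable (D_get_umi s_umi dict_umi) := by
  unfold D_get_umi; infer_instance

def Spec_get_umi (s_umi : String) (dict_umi : List (String × Int)) (out : String) : Prop :=
  ¬ D_get_umi s_umi dict_umi → out = get_umi_alt s_umi dict_umi
instance (s_umi : String) (dict_umi : List (String × Int)) (out : String) : Decidable (Spec_get_umi s_umi dict_umi out) := by unfold Spec_get_umi; infer_instance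

def pvDiffWitness_get_umi : String × (List (String × Int)) := ("AA", [("C", 0)])
def pvDiffWitnessOut_get_umi : String × String := ("C", "AA")

-- ===== CLAIM (what is proved, stated in full; the proofs are below) =====
def Claim_unchanged_get_umi : Prop := ∀ (s_umi : String) (dict_umi : List (String × Int)), Dom_get_umi s_umi dict_umi → Spec_get_umi s_umi dict_umi (get_umi s_umi dict_umi)
def Claim_changed_get_umi : Prop := Dom_get_umi (pvDiffWitness_get_umi.1) (pvDiffWitness_get_umi.2) ∧ D_get_umi (pvDiffWitness_get_umi.1) (pvDiffWitness_get_umi.2) ∧ get_umi (pvDiffWitness_get_umi.1) (pvDiffWitness_get_umi.2) = pvDiffWitnessOut_get_umi.1 ∧ get_umi_alt (pvDiffWitness_get_umi.1) (pvDiffWitness_get_umi.2) = pvDiffWitnessOut_get_umi.2 ∧ pvDiffWitnessOut_get_umi.1 ≠ pvDiffWitnessOut_get_umi.2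
def Claim_exact_get_umi : Prop := ∀ (s_umi : String) (dict_umi : List (String × Int)), Dom_get_umi s_umi dict_umi → D_get_umi s_umi dict_umi → get_umi s_umi dict_umi ≠ get_umi_alt s_umi dict_umi

-- ===== LEMMAS AND PROOFS =====

-- number of mismatching positions of the common prefix (what A's hamming_dist counts)
def hamNat (s u : List Char) : Nat := (s.zip u).countP (fun ab => ab.1 != ab.2)

-- first element (with its index) satisfying p, scanning from index i
def firstSat (p : List Char → Bool) : Nat → List (List Char) → Option (Nat × List Char)
  | _, [] => none
  | i, s :: rest => if p s then some (i, s) else firstSat p (i + 1) rest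

theorem pvHamming_eq (s u : List Char) : pvHamming s u = (hamNat s u : Int) := by
  unfold pvHamming hamNat
  rw [List.countP_eq_length_filter]
  generalize (s.zip u).filter _ = l
  induction l with
  | nil => simp
  | cons x l ih => simp [ih]; push_cast; ring

theorem pvHamming_beq (s u : List Char) : (pvHamming s u == (1 : Int)) = (hamNat s u == 1) := by
  rw [pvHamming_eq]
  simp

theorem loopA_eq (s_umi : String) (strs : List String) (i : Nat) :
    pvLoopA s_umi strs =
      (match firstSat (fun s => hamNat s s_umi.toList == 1) i (strs.map String.toList) with
       | none => s_umi
       | some h => String.ofList h.2) := by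
  induction strs generalizing i with
  | nil => rfl
  | cons s rest ih =>
    simp only [pvLoopA, List.map_cons, firstSat, pvHamming_beq]
    by_cases h : (hamNat s.toList s_umi.toList == 1) = true
    · simp [h, String.ofList_toList]
    · simp only [Bool.not_eq_true] at h
      simp [h, ih (i + 1)]

-- firstSat basics
theorem firstSat_none_iff (p : List Char → Bool) (i : Nat) (ks : List (List Char)) :
    firstSat p i ks = none ↔ ∀ s ∈ ks, ¬ p s := by
  induction ks generalizing i with
  | nil => simp [firstSat]
  | cons s rest ih =>
    by_cases h : p s <;> simp [firstSat, h, ih (i + 1)]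

theorem firstSat_idx (p : List Char → Bool) (i : Nat) (ks : List (List Char)) (j : Nat) (s : List Char)
    (h : firstSat p i ks = some (j, s)) : i ≤ j ∧ ks[j - i]? = some s ∧ p s := by
  induction ks generalizing i with
  | nil => simp [firstSat] at h
  | cons t rest ih =>
    by_cases hp : p t
    · simp [firstSat, hp] at h
      obtain ⟨h1, h2⟩ := h
      subst h1; subst h2
      simp [hp]
    · simp [firstSat, hp] at h
      obtain ⟨h1, h2, h3⟩ := ih (i + 1) h
      refine ⟨by omega, ?_, h3⟩
      have : j - i = (j - (i + 1)) + 1 := by omega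
      rw [this]
      simpa using h2

theorem firstSat_min (p : List Char → Bool) (i : Nat) (ks : List (List Char)) (j : Nat) (s : List Char)
    (h : firstSat p i ks = some (j, s)) :
    ∀ t s', ks[t]? = some s' → p s' → j ≤ i + t := by
  induction ks generalizing i with
  | nil => simp [firstSat] at h
  | cons x rest ih =>
    intro t s' ht hp'
    by_cases hp : p x
    · simp [firstSat, hp] at h
      omega
    · simp [firstSat, hp] at h
      cases t with
      | zero => simp at ht; subst ht; exact absurd hp' hp
      | succ t' =>
        simp at ht
        have := ih (i + 1) h t' s' ht hp'
        omega

theorem firstSat_complete (p : List Char → Bool) (i : Nat) (ks : List (List Char)) (t : Nat) (s' : List Char)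
    (ht : ks[t]? = some s') (hp : p s') :
    ∃ j s, firstSat p i ks = some (j, s) := by
  induction ks generalizing i t with
  | nil => simp at ht
  | cons x rest ih =>
    by_cases hpx : p x
    · exact ⟨i, x, by simp [firstSat, hpx]⟩
    · cases t with
      | zero => simp at ht; subst ht; exact absurd hp hpx
      | succ t' =>
        simp at ht
        obtain ⟨j, s, hj⟩ := ih (i + 1) t' ht
        exact ⟨j, s, by simp [firstSat, hpx, hj]⟩

-- the converse construction: an element known to be first IS what firstSat returns
theorem firstSat_of (p : List Char → Bool) (ks : List (List Char)) (i : Nat) (s : List Char)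
    (hi : ks[i]? = some s) (hp : p s)
    (hmin : ∀ j < i, ∀ t, ks[j]? = some t → ¬ p t) :
    firstSat p 0 ks = some (i, s) := by
  obtain ⟨j, s', hfs⟩ := firstSat_complete p 0 ks i s hi hp
  obtain ⟨-, hidx, hp'⟩ := firstSat_idx p 0 ks j s' hfs
  simp only [Nat.sub_zero] at hidx
  have hle : j ≤ i := by simpa using firstSat_min p 0 ks j s' hfs i s hi hp
  have hji : j = i := by
    rcases Nat.lt_or_ge j i with hlt | hge
    · exact absurd hp' (hmin j hlt s' hidx)
    · omega
  subst hji
  rw [hidx] at hi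
  rw [hfs, Option.some.inj hi]

-- get? after setdefault: the existing value wins, else the new one
theorem get?_setdefault_or {κ ν : Type} [BEq κ] [LawfulBEq κ] [DecidableEq κ]
    (d : PySem.Dict κ ν) (k k' : κ) (v : ν) :
    (d.setdefault k v).get? k' = if k' = k then (d.get? k).or (some v) else d.get? k' := by
  by_cases hc : d.contains k
  · rw [PySem.Dict.setdefault_of_contains d v hc]
    rw [PySem.Dict.contains_eq_isSome_get?] at hc
    obtain ⟨r, hr⟩ := Option.isSome_iff_exists.mp hc
    by_cases hk : k' = k <;> simp [hk, hr]
  · have hc' : d.contains k = false := by simpa using hc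
    rw [PySem.Dict.setdefault_of_not_contains d v hc']
    rw [PySem.Dict.contains_eq_isSome_get?] at hc
    have hn : d.get? k = none := by cases h : d.get? k <;> simp [h] at hc ⊢
    by_cases hk : k' = k
    · subst hk; simp [PySem.Dict.get?_insert_self, hn]
    · simp [PySem.Dict.get?_insert_of_ne d v hk, hk]

-- pvBuildIdx lookup characterisation
theorem pvBuildIdx_get? (L idx : Nat) (ks : List (List Char)) (D : PySem.Dict (List Char) Nat)
    (v : List Char) :
    (pvBuildIdx L idx ks D).get? v =
      (D.get? v).or ((firstSat (fun s => (s.length == L) && (s == v)) idx ks).map (·.1)) := by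
  induction ks generalizing idx D with
  | nil => simp [pvBuildIdx, firstSat]
  | cons s rest ih =>
    have hfs : firstSat (fun s => (s.length == L) && (s == v)) idx (s :: rest)
        = if (s.length == L) && (s == v) then some (idx, s)
          else firstSat (fun s => (s.length == L) && (s == v)) (idx + 1) rest := rfl
    by_cases hl : s.length = L
    · have hstep : pvBuildIdx L idx (s :: rest) D
          = pvBuildIdx L (idx + 1) rest (D.setdefault s idx) := by simp [pvBuildIdx, hl]
      rw [hstep, ih, hfs, get?_setdefault_or]
      by_cases hv : v = s
      · simp [hv, hl]
      · have : ¬ (s = v) := fun h => hv h.symm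
        simp [hv, this, hl]
    · have hstep : pvBuildIdx L idx (s :: rest) D = pvBuildIdx L (idx + 1) rest D := by
        simp [pvBuildIdx, hl]
      rw [hstep, ih, hfs]
      simp [hl]

-- hamNat basics
theorem hamNat_cons (x y : Char) (a b : List Char) :
    hamNat (x :: a) (y :: b) = hamNat a b + (if x = y then 0 else 1) := by
  by_cases h : x = y <;> simp [hamNat, h]

theorem hamNat_self (b : List Char) : hamNat b b = 0 := by
  induction b with
  | nil => rfl
  | cons x b ih => simp [hamNat_cons, ih]

theorem hamNat_zero_iff (a b : List Char) (h : a.length = b.length) : hamNat a b = 0 ↔ a = b := by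
  induction a generalizing b with
  | nil => cases b with | nil => simp [hamNat] | cons y bs => simp at h
  | cons x as ih =>
    cases b with
    | nil => simp at h
    | cons y bs =>
      simp only [List.length_cons, Nat.add_right_cancel_iff] at h
      rw [hamNat_cons]
      by_cases hxy : x = y <;> simp [hxy, ih bs h]

-- pvMask basics
theorem pvMask_length (p : List Char) (i : Nat) (c : Char) (h : i < p.length) :
    (pvMask p i c).length = p.length := by
  simp [pvMask]; omega

theorem mem_pvMask (p : List Char) (i : Nat) (c : Char) : c ∈ pvMask p i c := by
  simp [pvMask]

theorem pvMask_zero (x : Char) (b : List Char) (c : Char) : pvMask (x :: b) 0 c = c :: b := by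
  simp [pvMask]

theorem pvMask_succ (x : Char) (b : List Char) (j : Nat) (c : Char) :
    pvMask (x :: b) (j + 1) c = x :: pvMask b j c := by
  simp [pvMask]

theorem hamNat_mask (b : List Char) (j : Nat) (c : Char) (hj : j < b.length) (hc : ¬ c = b[j]) :
    hamNat (pvMask b j c) b = 1 := by
  induction j generalizing b with
  | zero =>
    cases b with
    | nil => simp at hj
    | cons y bs =>
      simp at hc
      rw [pvMask_zero, hamNat_cons, hamNat_self]
      simp [hc]
  | succ j ih =>
    cases b with
    | nil => simp at hj
    | cons y bs =>
      simp at hj hc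
      rw [pvMask_succ, hamNat_cons, ih bs hj hc]
      simp

theorem hamNat_eq_one (a b : List Char) (hlen : a.length = b.length) (h : hamNat a b = 1) :
    ∃ j c, ∃ hj : j < b.length, ¬ c = b[j] ∧ a = pvMask b j c := by
  induction a generalizing b with
  | nil => cases b <;> simp [hamNat] at h hlen
  | cons x as ih =>
    cases b with
    | nil => simp at hlen
    | cons y bs =>
      simp only [List.length_cons, Nat.add_right_cancel_iff] at hlen
      rw [hamNat_cons] at h
      by_cases hxy : x = y
      · simp [hxy] at h
        obtain ⟨j, c, hj, hc, ha⟩ := ih bs hlen h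
        exact ⟨j + 1, c, by simpa using hj, by simpa using hc, by rw [pvMask_succ, ha, hxy]⟩
      · simp [hxy] at h
        refine ⟨0, x, by simp, by simpa using hxy, ?_⟩
        rw [pvMask_zero, (hamNat_zero_iff as bs hlen).mp h]

-- the D_-side mismatch count IS A's zip-truncated Hamming distance
theorem cntEq (a b : List Char) : (a.zipWith (· != ·) b).count true = hamNat a b := by
  unfold hamNat
  induction a generalizing b with
  | nil => simp
  | cons c a ih =>
    cases b with
    | nil => simp
    | cons d b => simp [List.count_cons, List.countP_cons, ih]

-- D_'s find? over the pairs is the value component of the A-side firstSat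
theorem findPairs_eq_firstSat (s_umi : String) (d : List (String × Int)) (i : Nat) :
    (d.find? (fun kv => (kv.1.toList.zipWith (· != ·) s_umi.toList).count true == 1)).map
        (fun kv => kv.1.toList)
      = (firstSat (fun w => hamNat w s_umi.toList == 1) i (d.map (fun kv => kv.1.toList))).map (·.2) := by
  induction d generalizing i with
  | nil => rfl
  | cons kv rest ih =>
    have hp : (((kv.1.toList.zipWith (· != ·) s_umi.toList).count true == 1))
        = (hamNat kv.1.toList s_umi.toList == 1) := by
      rw [cntEq]
    by_cases h : (hamNat kv.1.toList s_umi.toList == 1) = true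
    · simp [List.find?_cons, firstSat, hp, h]
    · simp only [Bool.not_eq_true] at h
      simp [List.find?_cons, firstSat, hp, h, ih (i + 1)]

-- pvStep fold basics
theorem foldStep_mem (H : List (Option (Nat × List Char))) (b : Option (Nat × List Char)) :
    H.foldl pvStep b = b ∨ ∃ h, some h ∈ H ∧ H.foldl pvStep b = some h := by
  induction H generalizing b with
  | nil => left; rfl
  | cons x H ih =>
    rcases ih (pvStep b x) with h | ⟨h, hm, he⟩
    · cases x with
      | none => left; simpa [pvStep] using h
      | some hv =>
        cases b with
        | none => right; exact ⟨hv, by simp, by simpa [pvStep] using h⟩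
        | some bv =>
          simp only [pvStep] at h
          by_cases hlt : hv.1 < bv.1
          · right
            exact ⟨hv, by simp, by simp only [List.foldl_cons, pvStep, hlt, if_pos]; simpa [hlt] using h⟩
          · left; simp only [List.foldl_cons, pvStep, hlt]; simpa [hlt] using h
    · right; exact ⟨h, by simp [hm], by simpa [pvStep] using he⟩

theorem foldStep_le_start (H : List (Option (Nat × List Char))) (bv : Nat × List Char) :
    ∃ r, H.foldl pvStep (some bv) = some r ∧ r.1 ≤ bv.1 := by
  induction H generalizing bv with
  | nil => exact ⟨bv, rfl, le_refl _⟩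
  | cons x H ih =>
    cases x with
    | none => simpa [pvStep] using ih bv
    | some hv =>
      by_cases hlt : hv.1 < bv.1
      · obtain ⟨r, hr, hle⟩ := ih hv
        exact ⟨r, by simpa [pvStep, hlt] using hr, by omega⟩
      · obtain ⟨r, hr, hle⟩ := ih bv
        exact ⟨r, by simpa [pvStep, hlt] using hr, hle⟩

theorem foldStep_le (H : List (Option (Nat × List Char))) (b : Option (Nat × List Char))
    (h' : Nat × List Char) (hm : some h' ∈ H) :
    ∃ r, H.foldl pvStep b = some r ∧ r.1 ≤ h'.1 := by
  induction H generalizing b with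
  | nil => simp at hm
  | cons x H ih =>
    rcases List.mem_cons.mp hm with hx | hx
    · subst hx
      cases b with
      | none =>
        obtain ⟨r, hr, hle⟩ := foldStep_le_start H h'
        exact ⟨r, by simpa [pvStep] using hr, hle⟩
      | some bv =>
        by_cases hlt : h'.1 < bv.1
        · obtain ⟨r, hr, hle⟩ := foldStep_le_start H h'
          exact ⟨r, by simpa [pvStep, hlt] using hr, hle⟩
        · obtain ⟨r, hr, hle⟩ := foldStep_le_start H bv
          exact ⟨r, by simpa [pvStep, hlt] using hr, by omega⟩
    · exact ih (pvStep b x) hx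

-- the flattened list of hits the double loop folds over
def pvHits (u : List Char) (alph : List Char) (D : PySem.Dict (List Char) Nat) :
    List (Option (Nat × List Char)) :=
  (List.range u.length).flatMap (fun i =>
    alph.map (fun c =>
      if c == u.getD i c then none
      else pvHit D (pvMask u i c)))

theorem pvSearch_eq_foldl (u : List Char) (alph : List Char) (D : PySem.Dict (List Char) Nat) :
    pvSearch u alph D = (pvHits u alph D).foldl pvStep none := by
  unfold pvSearch pvHits
  simp only [List.foldl_flatMap, List.foldl_map]
  congr 1
  funext best i
  congr 1
  funext b c
  by_cases h : (c == u.getD i c) = true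
  · rw [if_pos h, if_pos h]; rfl
  · rw [if_neg h, if_neg h]

theorem mem_pvHits_iff (u : List Char) (alph : List Char) (D : PySem.Dict (List Char) Nat)
    (h : Nat × List Char) :
    some h ∈ pvHits u alph D ↔
      ∃ i < u.length, ∃ c ∈ alph,
        ¬ (c == u.getD i c) = true ∧ pvHit D (pvMask u i c) = some h := by
  unfold pvHits
  simp only [List.mem_flatMap, List.mem_map, List.mem_range]
  constructor
  · rintro ⟨i, hi, c, hc, he⟩
    by_cases hg : (c == u.getD i c) = true
    · rw [if_pos hg] at he; cases he
    · rw [if_neg hg] at he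
      exact ⟨i, hi, c, hc, hg, he⟩
  · rintro ⟨i, hi, c, hc, hg, he⟩
    exact ⟨i, hi, c, hc, by rw [if_neg hg]; exact he⟩

-- soundness: every hit is an equal-length matching key with its first index
theorem hits_sound (u : List Char) (ks : List (List Char)) (alph : List Char) (h : Nat × List Char)
    (hm : some h ∈ pvHits u alph (pvBuildIdx u.length 0 ks PySem.Dict.empty)) :
    ks[h.1]? = some h.2 ∧ h.2.length = u.length ∧ hamNat h.2 u = 1 := by
  obtain ⟨j, s⟩ := h
  rw [mem_pvHits_iff] at hm
  obtain ⟨i, hi, c, hcal, hg, he⟩ := hm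
  have hgetD : u.getD i c = u[i] := List.getD_eq_getElem _ _ hi
  have hc' : ¬ c = u[i] := by rw [hgetD] at hg; simpa using hg
  unfold pvHit at he
  rw [pvBuildIdx_get?] at he
  simp only [PySem.Dict.get?_empty, Option.none_or] at he
  cases hq : firstSat (fun t => (t.length == u.length) && (t == pvMask u i c)) 0 ks with
  | none => rw [hq] at he; simp at he
  | some p =>
    rw [hq] at he
    simp only [Option.map_some, Option.some.injEq, Prod.mk.injEq] at he
    obtain ⟨hj, hs⟩ := he
    obtain ⟨-, hidx, hpred⟩ := firstSat_idx _ 0 ks p.1 p.2 (by rw [hq])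
    simp only [Nat.sub_zero] at hidx
    simp only [Bool.and_eq_true, beq_iff_eq] at hpred
    obtain ⟨hlen, hval⟩ := hpred
    have hsm : s = pvMask u i c := hs.symm
    refine ⟨?_, ?_, ?_⟩
    · rw [← hj, hidx, hval, hsm]
    · rw [hsm]; exact pvMask_length u i c hi
    · rw [hsm]; exact hamNat_mask u i c hi hc'

-- completeness: every equal-length matching key yields a hit at an index no larger than its own
theorem hits_complete (u : List Char) (ks : List (List Char)) (alph : List Char)
    (halph : ∀ s ∈ ks, ∀ c ∈ s, c ∈ alph) (i : Nat) (s : List Char)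
    (hi : ks[i]? = some s) (hlen : s.length = u.length) (hs : hamNat s u = 1) :
    ∃ h, some h ∈ pvHits u alph (pvBuildIdx u.length 0 ks PySem.Dict.empty) ∧ h.1 ≤ i := by
  have hmem : s ∈ ks := List.mem_of_getElem? hi
  obtain ⟨j, c, hj, hc, hmask⟩ := hamNat_eq_one s u hlen hs
  have hcs : c ∈ s := hmask ▸ mem_pvMask u j c
  have hcal : c ∈ alph := halph s hmem c hcs
  have hpred : (fun t => (t.length == u.length) && (t == pvMask u j c)) s = true := by
    simp [hlen, ← hmask]
  obtain ⟨j', s', hfs⟩ := firstSat_complete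
    (fun t => (t.length == u.length) && (t == pvMask u j c)) 0 ks i s hi hpred
  have hmin := firstSat_min
    (fun t => (t.length == u.length) && (t == pvMask u j c)) 0 ks j' s' hfs i s hi hpred
  refine ⟨(j', pvMask u j c), ?_, by simpa using hmin⟩
  rw [mem_pvHits_iff]
  refine ⟨j, hj, c, hcal, ?_, ?_⟩
  · have hgd : u.getD j c = u[j] := List.getD_eq_getElem _ _ hj
    rw [hgd]; simpa using hc
  · unfold pvHit
    rw [pvBuildIdx_get?]
    simp only [PySem.Dict.get?_empty, Option.none_or, hfs]
    simp

-- the searched minimum-index hit IS the first equal-length matching key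
theorem search_eq_firstSat (u : List Char) (ks : List (List Char)) (alph : List Char)
    (halph : ∀ s ∈ ks, ∀ c ∈ s, c ∈ alph) :
    pvSearch u alph (pvBuildIdx u.length 0 ks PySem.Dict.empty) =
    firstSat (fun s => (s.length == u.length) && (hamNat s u == 1)) 0 ks := by
  rw [pvSearch_eq_foldl]
  cases hfs : firstSat (fun s => (s.length == u.length) && (hamNat s u == 1)) 0 ks with
  | none =>
    rcases foldStep_mem (pvHits u alph (pvBuildIdx u.length 0 ks PySem.Dict.empty)) none with h0 | ⟨h0, hm0, he0⟩
    · exact h0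
    · exfalso
      obtain ⟨hidx0, hlen0, hham0⟩ := hits_sound u ks alph h0 hm0
      exact (firstSat_none_iff _ 0 ks).mp hfs h0.2 (List.mem_of_getElem? hidx0)
        (by simp [hlen0, hham0])
  | some p =>
    have hfs' : firstSat (fun s => (s.length == u.length) && (hamNat s u == 1)) 0 ks = some (p.1, p.2) := by
      rw [hfs]
    obtain ⟨-, hidx, hpred⟩ := firstSat_idx _ 0 ks p.1 p.2 hfs'
    simp only [Nat.sub_zero] at hidx
    simp only [Bool.and_eq_true, beq_iff_eq] at hpred
    obtain ⟨hlen, hham⟩ := hpred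
    obtain ⟨h', hm', hle'⟩ := hits_complete u ks alph halph p.1 p.2 hidx hlen hham
    obtain ⟨r, hr, hler⟩ := foldStep_le _ none h' hm'
    rcases foldStep_mem (pvHits u alph (pvBuildIdx u.length 0 ks PySem.Dict.empty)) none with h0 | ⟨h0, hm0, he0⟩
    · rw [h0] at hr; cases hr
    · rw [he0] at hr ⊢
      have hre : h0 = r := Option.some.inj hr
      subst hre
      obtain ⟨hidx0, hlen0, hham0⟩ := hits_sound u ks alph h0 hm0
      have hmin0 := firstSat_min _ 0 ks p.1 p.2 hfs' h0.1 h0.2 hidx0 (by simp [hlen0, hham0])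
      simp only [Nat.zero_add] at hmin0
      have heq1 : h0.1 = p.1 := by omega
      have heq2 : h0.2 = p.2 := by
        rw [heq1] at hidx0
        rw [hidx] at hidx0
        exact (Option.some.inj hidx0).symm
      congr 1
      exact Prod.ext heq1 heq2

-- the A-side firstSat under ¬ D_ (given s_umi is not a key): none, or a match of equal length
theorem not_D_first (s_umi : String) (dict_umi : List (String × Int))
    (hnd : ¬ D_get_umi s_umi dict_umi)
    (hmem : dict_umi.any (fun kv => kv.1 == s_umi) = false)
    (i : Nat) (s : List Char)
    (hfs : firstSat (fun s => hamNat s s_umi.toList == 1) 0 (dict_umi.map (fun kv => kv.1.toList)) = some (i, s)) :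
    s.length = s_umi.toList.length := by
  by_contra hne
  apply hnd
  unfold D_get_umi
  constructor
  · simp only [List.any_eq_false, beq_iff_eq] at hmem
    simp only [List.mem_map, not_exists]
    rintro kv ⟨hkv, hkv1⟩
    exact hmem kv hkv hkv1
  · have hf : (dict_umi.find? (fun kv =>
        (kv.1.toList.zipWith (· != ·) s_umi.toList).count true == 1)).map (fun kv => kv.1.toList)
        = some s := by
      rw [findPairs_eq_firstSat s_umi dict_umi 0, hfs, Option.map_some]
    cases hq : dict_umi.find? (fun kv =>
        (kv.1.toList.zipWith (· != ·) s_umi.toList).count true == 1) with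
    | none => rw [hq] at hf; cases hf
    | some kv =>
      rw [hq, Option.map_some, Option.some.injEq] at hf
      simp only [Option.any_some, bne_iff_ne, ne_eq, decide_eq_true_eq]
      intro h
      apply hne
      calc s.length = kv.1.toList.length := by rw [hf]
        _ = kv.1.length := String.length_toList
        _ = s_umi.length := h
        _ = s_umi.toList.length := String.length_toList.symm

-- ===== VERDICT (by name: the statement is the Claim_ definition above) =====
theorem get_umi_spec : Claim_unchanged_get_umi := by
  unfold Claim_unchanged_get_umi Spec_get_umi
  intro s_umi dict_umi _ hnd
  unfold get_umi get_umi_alt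
  cases hmem : dict_umi.any (fun kv => kv.1 == s_umi) with
  | true => simp only [if_true]
  | false =>
    simp only [Bool.false_eq_true, if_false]
    rw [loopA_eq s_umi _ 0]
    have hmap : (dict_umi.map Prod.fst).map String.toList
        = dict_umi.map (fun kv => kv.1.toList) := by
      rw [List.map_map]; rfl
    rw [hmap]
    have halph : ∀ s ∈ dict_umi.map (fun kv => kv.1.toList), ∀ c ∈ s,
        c ∈ PySem.Set.ofList ((dict_umi.map (fun kv => kv.1.toList)).flatMap id) := by
      intro s hs c hc
      exact (PySem.Set.mem_ofList _ _).mpr (List.mem_flatMap.mpr ⟨s, hs, hc⟩)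
    rw [search_eq_firstSat s_umi.toList (dict_umi.map (fun kv => kv.1.toList)) _ halph]
    cases hA : firstSat (fun s => hamNat s s_umi.toList == 1) 0 (dict_umi.map (fun kv => kv.1.toList)) with
    | none =>
      have hB : firstSat (fun s => (s.length == s_umi.toList.length) && (hamNat s s_umi.toList == 1)) 0
          (dict_umi.map (fun kv => kv.1.toList)) = none := by
        rw [firstSat_none_iff]
        intro s hs
        have := (firstSat_none_iff _ 0 _).mp hA s hs
        simp only [Bool.and_eq_true, not_and] at this ⊢
        intro _; exact this
      rw [hB]
    | some p =>
      have hlen : p.2.length = s_umi.toList.length :=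
        not_D_first s_umi dict_umi hnd hmem p.1 p.2 (by rw [hA])
      obtain ⟨-, hidx, hpred⟩ := firstSat_idx _ 0 _ p.1 p.2 (show _ = some (p.1, p.2) by rw [hA])
      simp only [Nat.sub_zero] at hidx
      have hB : firstSat (fun s => (s.length == s_umi.toList.length) && (hamNat s s_umi.toList == 1)) 0
          (dict_umi.map (fun kv => kv.1.toList)) = some (p.1, p.2) := by
        apply firstSat_of
        · exact hidx
        · simp only [Bool.and_eq_true, beq_iff_eq]
          exact ⟨hlen, by simpa using hpred⟩
        · intro j hj t ht hp
          simp only [Bool.and_eq_true] at hp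
          have := firstSat_min _ 0 _ p.1 p.2 (show _ = some (p.1, p.2) by rw [hA]) j t ht hp.2
          omega
      rw [hB]

theorem get_umi_changed : Claim_changed_get_umi := by
  unfold Claim_changed_get_umi; decide

theorem get_umi_tight : Claim_exact_get_umi := by
  unfold Claim_exact_get_umi
  intro s_umi dict_umi _ hd
  obtain ⟨hnomem, hlen⟩ := hd
  have hmem : dict_umi.any (fun kv => kv.1 == s_umi) = false := by
    simp only [List.any_eq_false, beq_iff_eq]
    intro kv hkv heq
    exact hnomem (List.mem_map.mpr ⟨kv, hkv, heq⟩)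
  cases hq : dict_umi.find? (fun kv =>
      (kv.1.toList.zipWith (· != ·) s_umi.toList).count true == 1) with
  | none => rw [hq] at hlen; simp at hlen
  | some kv =>
    rw [hq] at hlen
    simp only [Option.any_some, bne_iff_ne, ne_eq, decide_eq_true_eq] at hlen
    have hf : (firstSat (fun w => hamNat w s_umi.toList == 1) 0
        (dict_umi.map (fun kv => kv.1.toList))).map (·.2) = some kv.1.toList := by
      rw [← findPairs_eq_firstSat s_umi dict_umi 0, hq, Option.map_some]
    cases hA : firstSat (fun s => hamNat s s_umi.toList == 1) 0 (dict_umi.map (fun kv => kv.1.toList)) with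
    | none => rw [hA] at hf; cases hf
    | some p =>
      rw [hA, Option.map_some, Option.some.injEq] at hf
      have hmap : (dict_umi.map Prod.fst).map String.toList
          = dict_umi.map (fun kv => kv.1.toList) := by rw [List.map_map]; rfl
      have hAval : get_umi s_umi dict_umi = String.ofList p.2 := by
        unfold get_umi
        rw [hmem]
        simp only [Bool.false_eq_true, if_false]
        rw [loopA_eq s_umi _ 0, hmap, hA]
      -- B returns a string of s_umi's length
      have hBlen : (get_umi_alt s_umi dict_umi).toList.length = s_umi.toList.length := by
        unfold get_umi_alt
        rw [hmem]
        simp only [Bool.false_eq_true, if_false]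
        have halph : ∀ s ∈ dict_umi.map (fun kv => kv.1.toList), ∀ c ∈ s,
            c ∈ PySem.Set.ofList ((dict_umi.map (fun kv => kv.1.toList)).flatMap id) := by
          intro s hs c hc
          exact (PySem.Set.mem_ofList _ _).mpr (List.mem_flatMap.mpr ⟨s, hs, hc⟩)
        rw [search_eq_firstSat s_umi.toList (dict_umi.map (fun kv => kv.1.toList)) _ halph]
        cases hB : firstSat (fun s => (s.length == s_umi.toList.length) && (hamNat s s_umi.toList == 1)) 0
            (dict_umi.map (fun kv => kv.1.toList)) with
        | none => simp
        | some q =>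
          obtain ⟨-, -, hpred⟩ := firstSat_idx _ 0 _ q.1 q.2 (show _ = some (q.1, q.2) by rw [hB])
          simp only [Bool.and_eq_true, beq_iff_eq] at hpred
          simpa [String.toList_ofList] using hpred.1
      intro heq
      apply hlen
      have h2 : (get_umi s_umi dict_umi).toList.length = s_umi.toList.length := by
        rw [heq]; exact hBlen
      rw [hAval] at h2
      have h3 : p.2.length = s_umi.toList.length := by
        simpa [String.toList_ofList] using h2
      rw [hf] at h3
      calc kv.1.length = kv.1.toList.length := String.length_toList.symm
        _ = s_umi.toList.length := h3
        _ = s_umi.length := String.length_toList
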